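-- pv_equiv track=rewrite | github.com/fabjonvince/Master_Thesis | src/tools.py | find_kg_pathes
-- ===== SOURCE A (Python) =====
-- def find_triplets(list_of_triplets, start=None, rel=None, end=None):
--     # Initialize an empty list to store the matching triplets
--     result = []
--     # Loop through each triplet in the input list
--     for triplet in list_of_triplets:
--         # Check if the triplet matches the start, rel, end parameters
--         # If any parameter is None, it means any value is acceptable
--         if (start is None or triplet[0] == start) and (rel is None or triplet[1] == rel) and (
--                 end is None or triplet[2] == end):
--             # Add the matching triplet to the result list
--             result.append(triplet)
--     # Return the result list
--     return result
--
-- def find_kg_pathes(start, end, kg:list, max_distance=3):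
--     if max_distance == 0:
--         return None
--     triplets = find_triplets(kg, end=end)
--     if len(triplets) == 0:
--         return None
--
--     final_trip = find_triplets(triplets, start=start)
--     if len(final_trip) != 0:
--         return [final_trip[0]]
--
--     for triplet in triplets:
--         new_end_node = triplet[0]
--         final_trip = find_kg_pathes(start, new_end_node, kg, max_distance-1)
--         if final_trip is not None:
--             final_trip.append(triplet)
--             return final_trip
-- ===== SOURCE B (Python) =====
-- def find_kg_pathes(start, end, kg: list, max_distance=3):
--     # Explicit stack-based depth-limited DFS instead of recursion.
--     if max_distance == 0:
--         return None
--     stack = [(end, max_distance, [])]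
--     while stack:
--         node, dist, suffix = stack.pop()
--         if dist == 0:
--             continue
--         preds = [t for t in kg if t[2] == node]
--         for t in preds:
--             if t[0] == start:
--                 return [t] + suffix
--         for t in reversed(preds):
--             stack.append((t[0], dist - 1, [t] + suffix))
--     return None
-- ===== Notes on version B (the rewrite author's own statement) =====
-- stated objective: alternative
-- what changed: Replaces A's recursion (recursive call per predecessor, result appended after return) with an explicit stack-based depth-limited DFS carrying (node, remaining distance, path suffix) frames and returning [edge]+suffix on the first direct edge.
-- outside the precondition, e.g. on find_kg_pathes('a', 'b', [], -1): A returns None, B returns None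
import Mathlib
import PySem

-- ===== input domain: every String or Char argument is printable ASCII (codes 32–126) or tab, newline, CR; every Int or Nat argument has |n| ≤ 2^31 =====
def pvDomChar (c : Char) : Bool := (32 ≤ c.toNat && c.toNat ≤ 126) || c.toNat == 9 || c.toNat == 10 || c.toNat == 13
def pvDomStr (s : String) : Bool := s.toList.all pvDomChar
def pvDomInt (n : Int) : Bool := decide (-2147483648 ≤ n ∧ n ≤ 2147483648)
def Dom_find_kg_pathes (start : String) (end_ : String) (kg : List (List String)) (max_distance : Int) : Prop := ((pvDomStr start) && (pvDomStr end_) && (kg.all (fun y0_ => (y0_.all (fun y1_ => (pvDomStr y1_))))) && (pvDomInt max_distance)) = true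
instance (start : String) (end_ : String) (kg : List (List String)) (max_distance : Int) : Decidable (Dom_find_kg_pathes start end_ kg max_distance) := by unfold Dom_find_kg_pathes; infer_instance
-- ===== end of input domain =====

-- B replaces A's recursion by an explicit stack-based depth-limited DFS (alternative decomposition, same cost).

-- ===== PORT A =====
-- find_triplets: the loop appending each triplet matching the optional start/rel/end filters.
-- triplet[0]/[1]/[2] rendered as getD (exact under Pre_: every kg row has length ≥ 3).
def find_triplets (l : List (List String)) (start rel end_ : Option String) : List (List String) :=
  l.foldl (fun res t =>
    if (start.elim true (fun s => t.getD 0 "" == s)) &&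
       (rel.elim true (fun r => t.getD 1 "" == r)) &&
       (end_.elim true (fun e => t.getD 2 "" == e))
    then res ++ [t] else res) []

-- the recursion of find_kg_pathes, fuelled by max_distance as a Nat (Pre_ gives 0 ≤ max_distance;
-- the Python's `if max_distance == 0: return None` is the fuel-0 case).  The final for-loop
-- (recurse on each predecessor triplet, append the triplet to the first non-None result, else
-- fall through returning None) is findSome? of the mapped recursive call.
def fkpCore (start : String) (kg : List (List String)) : Nat → String → Option (List (List String))
  | 0, _ => none
  | n+1, end_ =>
    let triplets := find_triplets kg none none (some end_)
    if triplets.length = 0 then none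
    else
      let final_trip := find_triplets triplets (some start) none none
      if final_trip.length ≠ 0 then some [final_trip.headD []]
      else triplets.findSome? (fun t => (fkpCore start kg n (t.getD 0 "")).map (fun p => p ++ [t]))

def find_kg_pathes (start : String) (end_ : String) (kg : List (List String)) (max_distance : Int) : Option (List (List String)) :=
  fkpCore start kg max_distance.toNat end_

-- ===== PORT B =====
-- helper cited by fkpStack's termination proof: a map whose values are all c sums to length * c
theorem pvSumMapConstF {α : Type u} (l : List α) (f : α → Nat) (c : Nat) (h : ∀ x, f x = c) : (l.map f).sum = l.length * c := by
  induction l with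
  | nil => simp
  | cons x xs ih => simp [h, ih, Nat.succ_mul, Nat.add_comm]

-- the while-loop over the stack; Python's stack (top = last element) is modelled top-at-head, so
-- pushing reversed(preds) one by one is prepending preds in order.  `preds` (the comprehension) is
-- written out at both its uses; remaining distance is a Nat (exact under Pre_: 0 ≤ max_distance).
def fkpStack (start : String) (kg : List (List String)) (frames : List (String × Nat × List (List String))) : Option (List (List String)) :=
  match frames with
  | [] => none
  | (node, d, suffix) :: rest =>
    if d = 0 then fkpStack start kg rest
    else
      match (kg.filter (fun t => t.getD 2 "" == node)).find? (fun t => t.getD 0 "" == start) with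
      | some t => some (t :: suffix)
      | none => fkpStack start kg ((kg.filter (fun t => t.getD 2 "" == node)).map (fun t => (t.getD 0 "", d - 1, t :: suffix)) ++ rest)
termination_by (frames.map (fun f => (kg.length + 1) ^ f.2.1)).sum
decreasing_by
  · simp only [List.map_cons, List.sum_cons]
    have : 0 < (kg.length + 1) ^ d := Nat.pow_pos (by omega)
    omega
  · simp only [List.map_cons, List.sum_cons, List.map_append, List.sum_append, List.map_map]
    have hconst := pvSumMapConstF (α := {x // x ∈ kg}) (List.filter (fun x => (↑x : List String).getD 2 "" == node) kg.attach)
      ((fun f : String × Nat × List (List String) => (kg.length + 1) ^ f.2.1) ∘ fun x : {x // x ∈ kg} => ((↑x : List String).getD 0 "", d - 1, (↑x : List String) :: suffix))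
      ((kg.length + 1) ^ (d - 1)) (fun _ => rfl)
    rw [hconst]
    have hpos : 0 < (kg.length + 1) ^ (d - 1) := Nat.pow_pos (by omega)
    have hpow : (kg.length + 1) ^ d = (kg.length + 1) ^ (d - 1) * (kg.length + 1) := by
      conv_lhs => rw [show d = (d - 1) + 1 by omega]
      rw [pow_succ]
    have h2 : kg.length * (kg.length + 1) ^ (d - 1) < (kg.length + 1) * (kg.length + 1) ^ (d - 1) :=
      Nat.mul_lt_mul_of_pos_right (by omega) hpos
    have step : ∀ L : Nat, L ≤ kg.length → L * (kg.length + 1) ^ (d - 1) < (kg.length + 1) ^ d := by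
      intro L hL
      calc L * (kg.length + 1) ^ (d - 1) ≤ kg.length * (kg.length + 1) ^ (d - 1) := Nat.mul_le_mul_right _ hL
        _ < (kg.length + 1) * (kg.length + 1) ^ (d - 1) := h2
        _ = (kg.length + 1) ^ d := by rw [hpow, Nat.mul_comm]
    exact Nat.add_lt_add_right (step _ (le_trans (List.length_filter_le _ _) (by simp))) _

def find_kg_pathes_alt (start : String) (end_ : String) (kg : List (List String)) (max_distance : Int) : Option (List (List String)) :=
  if max_distance == 0 then none
  else fkpStack start kg [(end_, max_distance.toNat, [])]

-- ===== PRECONDITION & SPEC =====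
-- Pre_ excludes negative max_distance, on which A's recursion can run without bound (RecursionError),
-- and kg rows shorter than 3 entries, on which triplet[2]/triplet[0] raises IndexError.
def Pre_find_kg_pathes (start : String) (end_ : String) (kg : List (List String)) (max_distance : Int) : Prop :=
  0 ≤ max_distance ∧ ∀ t ∈ kg, 3 ≤ t.length
instance (start : String) (end_ : String) (kg : List (List String)) (max_distance : Int) : Decidable (Pre_find_kg_pathes start end_ kg max_distance) := by unfold Pre_find_kg_pathes; infer_instance

def pvWitness_find_kg_pathes : String × String × List (List String) × Int := ("a", "c", [["a", "r", "b"], ["b", "r", "c"]], 3)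

def Spec_find_kg_pathes (start : String) (end_ : String) (kg : List (List String)) (max_distance : Int) (out : Option (List (List String))) : Prop := out = find_kg_pathes_alt start end_ kg max_distance
instance (start : String) (end_ : String) (kg : List (List String)) (max_distance : Int) (out : Option (List (List String))) : Decidable (Spec_find_kg_pathes start end_ kg max_distance out) := by unfold Spec_find_kg_pathes; infer_instance

-- ===== CLAIM (what is proved, stated in full; the proofs are below) =====
def Claim_equal_find_kg_pathes : Prop := ∀ (start : String) (end_ : String) (kg : List (List String)) (max_distance : Int), Dom_find_kg_pathes start end_ kg max_distance → Pre_find_kg_pathes start end_ kg max_distance → Spec_find_kg_pathes start end_ kg max_distance (find_kg_pathes start end_ kg max_distance)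

-- ===== LEMMAS AND PROOFS =====

theorem pvFoldlFilter {α : Type} (p : α → Bool) (l : List α) (acc : List α) :
    l.foldl (fun res t => if p t then res ++ [t] else res) acc = acc ++ l.filter p := by
  induction l generalizing acc with
  | nil => simp
  | cons x xs ih =>
    by_cases h : p x <;> simp [List.foldl_cons, h, ih]

theorem ft_end (l : List (List String)) (e : String) :
    find_triplets l none none (some e) = l.filter (fun t => t.getD 2 "" == e) := by
  unfold find_triplets
  simp only [Option.elim_none, Option.elim_some, Bool.true_and]
  rw [pvFoldlFilter]
  rw [List.nil_append]

theorem ft_start (l : List (List String)) (s : String) :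
    find_triplets l (some s) none none = l.filter (fun t => t.getD 0 "" == s) := by
  unfold find_triplets
  simp only [Option.elim_none, Option.elim_some, Bool.and_true]
  rw [pvFoldlFilter]
  rw [List.nil_append]

theorem pvHead?Filter {α : Type} (p : α → Bool) (l : List α) :
    (l.filter p).head? = l.find? p := by
  induction l with
  | nil => simp
  | cons x xs ih => by_cases h : p x <;> simp [h, ih]

theorem fkpStack_nil (start : String) (kg : List (List String)) : fkpStack start kg [] = none := by
  rw [fkpStack.eq_def]

theorem fkpStack_cons_zero (start : String) (kg : List (List String)) (node : String) (suffix : List (List String)) (rest : List (String × Nat × List (List String))) :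
    fkpStack start kg ((node, 0, suffix) :: rest) = fkpStack start kg rest := by
  rw [fkpStack.eq_def]
  simp

theorem fkpStack_cons_succ (start : String) (kg : List (List String)) (node : String) (n : Nat) (suffix : List (List String)) (rest : List (String × Nat × List (List String))) :
    fkpStack start kg ((node, n+1, suffix) :: rest)
      = match (kg.filter (fun t => t.getD 2 "" == node)).find? (fun t => t.getD 0 "" == start) with
        | some t => some (t :: suffix)
        | none => fkpStack start kg ((kg.filter (fun t => t.getD 2 "" == node)).map (fun t => (t.getD 0 "", n, t :: suffix)) ++ rest) := by
  rw [fkpStack.eq_def]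
  simp

theorem fkpCore_zero (start : String) (kg : List (List String)) (node : String) :
    fkpCore start kg 0 node = none := rfl

theorem fkpCore_succ (start : String) (kg : List (List String)) (n : Nat) (node : String) :
    fkpCore start kg (n+1) node
      = (if (kg.filter (fun t => t.getD 2 "" == node)).length = 0 then none
         else if ((kg.filter (fun t => t.getD 2 "" == node)).filter (fun t => t.getD 0 "" == start)).length ≠ 0
              then some [((kg.filter (fun t => t.getD 2 "" == node)).filter (fun t => t.getD 0 "" == start)).headD []]
              else (kg.filter (fun t => t.getD 2 "" == node)).findSome? (fun t => (fkpCore start kg n (t.getD 0 "")).map (fun p => p ++ [t]))) := by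
  conv_lhs => rw [fkpCore]
  rw [ft_end, ft_start]

-- the DFS invariant: a frame (node, n, suffix) on top of the stack behaves as A's recursive call
-- with fuel n at node, its result extended by suffix; on failure the rest of the stack is processed.
theorem pvStackCore (start : String) (kg : List (List String)) :
    ∀ (n : Nat) (node : String) (suffix : List (List String)) (rest : List (String × Nat × List (List String))),
      fkpStack start kg ((node, n, suffix) :: rest)
        = match fkpCore start kg n node with
          | some p => some (p ++ suffix)
          | none => fkpStack start kg rest := by
  intro n
  induction n with
  | zero =>
    intro node suffix rest
    rw [fkpStack_cons_zero, fkpCore_zero]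
  | succ n ih =>
    have inner : ∀ (ts : List (List String)) (suffix : List (List String)) (rest : List (String × Nat × List (List String))),
        fkpStack start kg (ts.map (fun t => (t.getD 0 "", n, t :: suffix)) ++ rest)
          = match ts.findSome? (fun t => (fkpCore start kg n (t.getD 0 "")).map (fun p => p ++ [t])) with
            | some p => some (p ++ suffix)
            | none => fkpStack start kg rest := by
      intro ts
      induction ts with
      | nil =>
        intro suffix rest
        simp only [List.map_nil, List.nil_append, List.findSome?_nil]
      | cons t ts' ihts =>
        intro suffix rest
        simp only [List.map_cons, List.cons_append, List.findSome?_cons]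
        rw [ih (t.getD 0 "") (t :: suffix) (ts'.map (fun t => (t.getD 0 "", n, t :: suffix)) ++ rest)]
        cases h : fkpCore start kg n (t.getD 0 "") with
        | some p => simp
        | none => simp only [Option.map_none]; exact ihts suffix rest
    intro node suffix rest
    rw [fkpStack_cons_succ, fkpCore_succ]
    by_cases hnil : kg.filter (fun t => t.getD 2 "" == node) = []
    · rw [hnil]
      simp
    · have hlen0 : ¬ (kg.filter (fun t => t.getD 2 "" == node)).length = 0 := by
        simpa [List.length_eq_zero_iff] using hnil
      rw [if_neg hlen0]
      cases hfind : (kg.filter (fun t => t.getD 2 "" == node)).find? (fun t => t.getD 0 "" == start) with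
      | none =>
        have hfe : (kg.filter (fun t => t.getD 2 "" == node)).filter (fun t => t.getD 0 "" == start) = [] := by
          rw [← List.head?_eq_none_iff, pvHead?Filter]
          exact hfind
        rw [hfe]
        simp only [List.length_nil, ne_eq, not_true_eq_false, if_false]
        exact inner (kg.filter (fun t => t.getD 2 "" == node)) suffix rest
      | some t =>
        have hhd : ((kg.filter (fun t => t.getD 2 "" == node)).filter (fun t => t.getD 0 "" == start)).head? = some t := by
          rw [pvHead?Filter]; exact hfind
        have hne : ((kg.filter (fun t => t.getD 2 "" == node)).filter (fun t => t.getD 0 "" == start)).length ≠ 0 := by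
          intro h0
          rw [List.length_eq_zero_iff] at h0
          rw [h0] at hhd
          simp at hhd
        rw [if_pos hne]
        have hhdD : ((kg.filter (fun t => t.getD 2 "" == node)).filter (fun t => t.getD 0 "" == start)).headD [] = t := by
          rw [List.headD_eq_head?_getD, hhd]
          rfl
        rw [hhdD]
        simp only [List.cons_append, List.nil_append]

-- ===== VERDICT (by name: the statement is the Claim_ definition above) =====
theorem find_kg_pathes_spec : Claim_equal_find_kg_pathes := by
  intro start end_ kg max_distance _ hpre
  unfold Spec_find_kg_pathes find_kg_pathes find_kg_pathes_alt
  by_cases h0 : max_distance = 0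
  · simp [h0, fkpCore_zero]
  · have hbeq : (max_distance == 0) = false := by simpa using h0
    rw [hbeq]
    simp only [Bool.false_eq_true, if_false]
    rw [pvStackCore start kg max_distance.toNat end_ [] []]
    cases h : fkpCore start kg max_distance.toNat end_ with
    | some p => simp
    | none => simp [fkpStack_nil]
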